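-- pv_equiv track=rewrite | github.com/DeanTognolini/network-validation-suite | tests/topology_validator.py | _normalize_interface_name
-- ===== SOURCE A (Python) =====
-- def _normalize_interface_name(interface_name):
--     """Normalize interface name for comparison by removing spaces and converting to lowercase"""
--     if not interface_name:
--         return ""
--
--     # Remove spaces and convert to lowercase
--     normalized = interface_name.replace(" ", "").lower()
--
--     # Map short interface names to standard ones
--     interface_map = {
--         'gi': 'gigabitethernet',
--         'ge': 'gigabitethernet',
--         'fa': 'fastethernet',
--         'fe': 'fastethernet',
--         'te': 'tengigabitethernet',
--         'eth': 'ethernet',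
--         'po': 'port-channel',
--         'portch': 'port-channel',
--         'lo': 'loopback'
--     }
--
--     # Try to match and replace short interface names
--     for short, long in interface_map.items():
--         if normalized.startswith(short):
--             remaining = normalized[len(short):]
--             if remaining and (remaining[0].isdigit() or remaining[0] == '/'):
--                 normalized = long + remaining
--                 break
--
--     return normalized
-- ===== SOURCE B (Python) =====
-- def _normalize_interface_name(interface_name):
--     """Normalize interface name for comparison by removing spaces and converting to lowercase"""
--     if not interface_name:
--         return ""
--
--     normalized = interface_name.replace(" ", "").lower()
--
--     interface_map = {
--         'gi': 'gigabitethernet',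
--         'ge': 'gigabitethernet',
--         'fa': 'fastethernet',
--         'fe': 'fastethernet',
--         'te': 'tengigabitethernet',
--         'eth': 'ethernet',
--         'po': 'port-channel',
--         'portch': 'port-channel',
--         'lo': 'loopback'
--     }
--
--     # Head = maximal leading run before the first digit or '/'; one lookup replaces A's prefix scan.
--     i = 0
--     while i < len(normalized) and not (normalized[i].isdigit() or normalized[i] == '/'):
--         i += 1
--     head, rest = normalized[:i], normalized[i:]
--
--     if rest and head in interface_map:
--         return interface_map[head] + rest
--     return normalized
-- ===== Notes on version B (the rewrite author's own statement) =====
-- stated objective: idiomatic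
-- what changed: B replaces A's loop over all nine short prefixes with startswith tests by a single split of the normalized name at the first digit-or-slash character and one dictionary lookup of the resulting head.
import Mathlib
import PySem

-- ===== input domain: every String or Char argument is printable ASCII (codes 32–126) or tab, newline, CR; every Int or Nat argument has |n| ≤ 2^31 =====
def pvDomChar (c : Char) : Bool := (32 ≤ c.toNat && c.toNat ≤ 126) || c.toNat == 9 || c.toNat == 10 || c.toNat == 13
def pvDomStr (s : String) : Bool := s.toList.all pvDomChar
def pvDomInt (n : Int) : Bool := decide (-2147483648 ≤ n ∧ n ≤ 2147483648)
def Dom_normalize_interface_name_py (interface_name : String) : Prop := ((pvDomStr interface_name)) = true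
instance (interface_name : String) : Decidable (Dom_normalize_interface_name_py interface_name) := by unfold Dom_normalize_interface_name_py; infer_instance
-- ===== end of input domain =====

-- B replaces A's per-prefix startswith scan by one split at the first digit-or-'/' char and a single map lookup (idiomatic).

-- the boundary test `c.isdigit() or c == '/'` both Pythons write inline
def nifP (c : Char) : Bool := PySem.Chars.isdigit c || c == '/'

-- ===== PORT A =====
-- the interface_map, in A's insertion order
def nifMap : List (List Char × List Char) :=
  [("gi".toList, "gigabitethernet".toList), ("ge".toList, "gigabitethernet".toList),
   ("fa".toList, "fastethernet".toList), ("fe".toList, "fastethernet".toList),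
   ("te".toList, "tengigabitethernet".toList), ("eth".toList, "ethernet".toList),
   ("po".toList, "port-channel".toList), ("portch".toList, "port-channel".toList),
   ("lo".toList, "loopback".toList)]

-- the for-loop over interface_map.items() with break
def nifLoopA : List (List Char × List Char) → List Char → List Char
  | [], n => n
  | (s, l) :: rest, n =>
    if PySem.Chars.startswith n s then
      let remaining := PySem.Chars.slice n (some (s.length : Int)) none
      -- `remaining and (remaining[0].isdigit() or remaining[0] == '/')`
      if (match remaining with
          | c :: _ => nifP c
          | [] => false) then l ++ remaining
      else nifLoopA rest n
    else nifLoopA rest n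

def normalize_interface_name_py (interface_name : String) : String :=
  if interface_name = "" then ""
  else
    let normalized := PySem.Chars.lower (PySem.Chars.replace interface_name.toList (" ".toList) [])
    String.ofList (nifLoopA nifMap normalized)

-- ===== PORT B =====
-- the while loop: split at the first char with `isdigit() or == '/'`
def nifSplit : List Char → List Char × List Char
  | [] => ([], [])
  | c :: cs =>
    if nifP c then ([], c :: cs)
    else
      let hr := nifSplit cs
      (c :: hr.1, hr.2)

def normalize_interface_name_py_alt (interface_name : String) : String :=
  if interface_name = "" then ""
  else
    let normalized := PySem.Chars.lower (PySem.Chars.replace interface_name.toList (" ".toList) [])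
    let hr := nifSplit normalized
    if hr.2 ≠ [] then
      match (PySem.Dict.mk nifMap).get? hr.1 with
      | some long => String.ofList (long ++ hr.2)
      | none => String.ofList normalized
    else String.ofList normalized

-- ===== PRECONDITION & SPEC =====
def Spec_normalize_interface_name_py (interface_name : String) (out : String) : Prop := out = normalize_interface_name_py_alt interface_name
instance (interface_name : String) (out : String) : Decidable (Spec_normalize_interface_name_py interface_name out) := by unfold Spec_normalize_interface_name_py; infer_instance

-- ===== CLAIM (what is proved, stated in full; the proofs are below) =====
def Claim_equal_normalize_interface_name_py : Prop := ∀ (interface_name : String), Dom_normalize_interface_name_py interface_name → Spec_normalize_interface_name_py interface_name (normalize_interface_name_py interface_name)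

-- ===== LEMMAS AND PROOFS =====

lemma nifSplit_eq (n : List Char) :
    nifSplit n = (n.takeWhile (fun c => !nifP c), n.dropWhile (fun c => !nifP c)) := by
  induction n with
  | nil => rfl
  | cons c cs ih =>
    rw [nifSplit, List.takeWhile_cons, List.dropWhile_cons]
    by_cases h : nifP c = true
    · simp [h]
    · simp [h, ih]

-- A's match condition for a key s ⟺ the head run equals s and the rest is nonempty
lemma nifMatch_iff (s n : List Char) (hq : s.all (fun c => !nifP c) = true) :
    (s <+: n ∧ (match n.drop s.length with
                | c :: _ => nifP c
                | [] => false) = true)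
    ↔ (n.takeWhile (fun c => !nifP c) = s ∧ n.dropWhile (fun c => !nifP c) ≠ []) := by
  induction s generalizing n with
  | nil =>
    cases n with
    | nil => simp
    | cons d n' =>
      rw [List.takeWhile_cons, List.dropWhile_cons]
      by_cases hd : nifP d = true
      · simp [hd]
      · rw [eq_false_of_ne_true hd]
        simpa using hd
  | cons c s' ih =>
    simp only [List.all_cons, Bool.and_eq_true] at hq
    cases n with
    | nil => simp
    | cons d n' =>
      rw [List.takeWhile_cons, List.dropWhile_cons]
      by_cases hcd : c = d
      · subst hcd
        rw [hq.1]
        simp only [List.cons_prefix_cons, List.length_cons, List.drop_succ_cons,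
                   if_true, true_and, List.cons.injEq]
        exact ih n' hq.2
      · constructor
        · rintro ⟨hpre, -⟩
          exact absurd (List.cons_prefix_cons.mp hpre).1 hcd
        · rintro ⟨ht, -⟩
          by_cases hd : nifP d = true
          · rw [hd] at ht
            simp at ht
          · rw [eq_false_of_ne_true hd] at ht
            simp only [Bool.not_false, if_true] at ht
            exact absurd (((List.cons.injEq _ _ _ _).mp ht).1).symm hcd

-- drop past the matched key is the dropWhile tail
lemma nifDrop_eq (n : List Char) (s : List Char)
    (h : n.takeWhile (fun c => !nifP c) = s) :
    n.drop s.length = n.dropWhile (fun c => !nifP c) := by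
  subst h
  have h2 := congrArg (List.drop (n.takeWhile (fun c => !nifP c)).length)
    (List.takeWhile_append_dropWhile (p := fun c => !nifP c) (l := n))
  rw [List.drop_left] at h2
  exact h2.symm

-- the generic loop characterisation: A's loop = split + first-match lookup
lemma nifLoopA_eq (m : List (List Char × List Char)) (n : List Char)
    (hm : ∀ p ∈ m, p.1.all (fun c => !nifP c) = true) :
    nifLoopA m n =
      if n.dropWhile (fun c => !nifP c) ≠ [] then
        match (PySem.Dict.mk m).get? (n.takeWhile (fun c => !nifP c)) with
        | some long => long ++ n.dropWhile (fun c => !nifP c)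
        | none => n
      else n := by
  induction m with
  | nil =>
    simp [nifLoopA, PySem.Dict.get?]
  | cons p rest ih =>
    obtain ⟨s, l⟩ := p
    have hs : s.all (fun c => !nifP c) = true := hm ⟨s, l⟩ (by simp)
    have hrest : ∀ p ∈ rest, p.1.all (fun c => !nifP c) = true :=
      fun p hp => hm p (by simp [hp])
    have hslice : PySem.Chars.slice n (some (s.length : Int)) none = n.drop s.length := by
      rw [PySem.Chars.slice_eq_listSlice, PySem.List.slice_from_natCast]
    by_cases hcond : (s <+: n ∧ (match n.drop s.length with
                | c :: _ => nifP c
                | [] => false) = true)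
    · -- A's step fires: the head run equals s and the rest is nonempty
      have hiff := (nifMatch_iff s n hs).mp hcond
      have hsw : PySem.Chars.startswith n s = true := (PySem.Chars.startswith_iff n s).mpr hcond.1
      have hdrop := nifDrop_eq n s hiff.1
      rw [nifLoopA, if_pos hsw]
      simp only [hslice, hdrop]
      rw [if_pos (by rw [← hdrop]; exact hcond.2)]
      rw [if_pos hiff.2, hiff.1, PySem.Dict.get?_mk_cons]
      simp
    · -- A's step does not fire: peel it off and use the IH
      have hni : ¬ (n.takeWhile (fun c => !nifP c) = s ∧ n.dropWhile (fun c => !nifP c) ≠ []) :=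
        fun h => hcond ((nifMatch_iff s n hs).mpr h)
      have hstep : nifLoopA ((s, l) :: rest) n = nifLoopA rest n := by
        rw [nifLoopA]
        by_cases hsw : PySem.Chars.startswith n s = true
        · have hpre : s <+: n := (PySem.Chars.startswith_iff n s).mp hsw
          rw [if_pos hsw]
          simp only [hslice]
          rw [if_neg (fun hb => hcond ⟨hpre, hb⟩)]
        · rw [if_neg hsw]
      rw [hstep, ih hrest]
      by_cases hdw : n.dropWhile (fun c => !nifP c) ≠ []
      · rw [if_pos hdw, if_pos hdw, PySem.Dict.get?_mk_cons]
        have hne : (s == n.takeWhile (fun c => !nifP c)) = false :=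
          beq_eq_false_iff_ne.mpr (fun h => hni ⟨h.symm, hdw⟩)
        rw [hne]
        simp
      · rw [if_neg hdw, if_neg hdw]

-- ===== VERDICT (by name: the statement is the Claim_ definition above) =====
theorem normalize_interface_name_py_spec : Claim_equal_normalize_interface_name_py := by
  intro interface_name _
  unfold Spec_normalize_interface_name_py normalize_interface_name_py normalize_interface_name_py_alt
  by_cases h : interface_name = ""
  · simp [h]
  · simp only [h, if_false]
    rw [nifSplit_eq, nifLoopA_eq nifMap _ (by decide)]
    set n := PySem.Chars.lower (PySem.Chars.replace interface_name.toList (" ".toList) [])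
    by_cases hdw : n.dropWhile (fun c => !nifP c) ≠ []
    · rw [if_pos hdw]
      simp only [if_pos hdw]
      cases (PySem.Dict.mk nifMap).get? (n.takeWhile (fun c => !nifP c)) with
      | none => simp
      | some long => simp
    · rw [if_neg hdw]
      simp only [if_neg hdw]
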